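-- pv_equiv track=rewrite | github.com/mariomorvan/Denoising-Time-Series-Transformer | models/models.py | route_args
-- ===== SOURCE A (Python) =====
-- def route_args(router, args, depth):
--     routed_args = [(dict(), dict()) for _ in range(depth)]
--     matched_keys = [key for key in args.keys() if key in router]
--
--     for key in matched_keys:
--         val = args[key]
--         for depth, ((f_args, g_args), routes) in enumerate(zip(routed_args, router[key])):
--             new_f_args, new_g_args = map(lambda route: (
--                 {key: val} if route else {}), routes)
--             routed_args[depth] = ({**f_args, **new_f_args},
--                                   {**g_args, **new_g_args})
--     return routed_args
-- ===== SOURCE B (Python) =====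
-- def route_args(router, args, depth):
--     matched = [(k, v) for k, v in args.items() if k in router]
--     out = []
--     for d in range(depth):
--         f_args, g_args = {}, {}
--         for k, v in matched:
--             entry = router[k]
--             if d < len(entry):
--                 f_route, g_route = entry[d]
--                 if f_route:
--                     f_args[k] = v
--                 if g_route:
--                     g_args[k] = v
--         out.append((f_args, g_args))
--     return out
-- ===== Notes on version B (the rewrite author's own statement) =====
-- stated objective: simpler
-- what changed: Builds the result depth-by-depth, constructing each layer's (f_args, g_args) directly from the matched items, instead of A's key-by-key pass that repeatedly rewrites every layer with {**old, **new} dict merges.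
import Mathlib
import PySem

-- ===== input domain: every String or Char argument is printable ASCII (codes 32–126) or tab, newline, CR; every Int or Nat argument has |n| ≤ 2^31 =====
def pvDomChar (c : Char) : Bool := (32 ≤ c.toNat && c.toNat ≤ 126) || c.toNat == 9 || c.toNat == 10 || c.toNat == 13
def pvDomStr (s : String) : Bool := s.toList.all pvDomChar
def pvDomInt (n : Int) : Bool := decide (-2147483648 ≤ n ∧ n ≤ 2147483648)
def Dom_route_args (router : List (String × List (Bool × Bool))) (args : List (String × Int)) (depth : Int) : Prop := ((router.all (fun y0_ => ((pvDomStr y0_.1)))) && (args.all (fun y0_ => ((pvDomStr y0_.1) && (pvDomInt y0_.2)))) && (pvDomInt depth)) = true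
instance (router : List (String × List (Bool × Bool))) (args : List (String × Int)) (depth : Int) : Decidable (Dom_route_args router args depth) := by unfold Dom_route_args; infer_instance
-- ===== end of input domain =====

-- B builds the result depth-by-depth (each layer constructed directly from the matched items)
-- instead of A's key-by-key pass rewriting every layer with dict merges; objective: simpler.

-- ===== PORT A =====
-- {**f_args, **new_f_args} where new_f_args = {key: val} if route else {}
def pvMergeA (key : String) (val : Int)
    (fg : PySem.Dict String Int × PySem.Dict String Int) (routes : Bool × Bool) :
    PySem.Dict String Int × PySem.Dict String Int :=
  let newF := if routes.1 then [(key, val)] else []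
  let newG := if routes.2 then [(key, val)] else []
  (PySem.Dict.update fg.1 newF, PySem.Dict.update fg.2 newG)

-- 'for depth, ((f_args, g_args), routes) in enumerate(zip(routed_args, router[key])): routed_args[depth] = …'
def pvInnerA (key : String) (val : Int) :
    List (PySem.Dict String Int × PySem.Dict String Int) → List (Bool × Bool) →
    List (PySem.Dict String Int × PySem.Dict String Int)
  | [], _ => []
  | routed, [] => routed
  | fg :: rest, r :: rs => pvMergeA key val fg r :: pvInnerA key val rest rs

def route_args (router : List (String × List (Bool × Bool))) (args : List (String × Int)) (depth : Int) : List ((List (String × Int)) × (List (String × Int))) :=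
  let routerD : PySem.Dict String (List (Bool × Bool)) := PySem.Dict.ofList router
  let argsD : PySem.Dict String Int := PySem.Dict.ofList args
  let routed0 : List (PySem.Dict String Int × PySem.Dict String Int) :=
    (PySem.List.pyRange 0 depth 1).map (fun _ => (PySem.Dict.empty, PySem.Dict.empty))
  let matchedKeys := argsD.keys.filter (fun k => routerD.contains k)
  let final := matchedKeys.foldl
    (fun routed key => pvInnerA key (argsD.getD key 0) routed (routerD.getD key [])) routed0
  final.map (fun fg => (fg.1.items, fg.2.items))

-- ===== PORT B =====
-- body of 'for k, v in matched:' for layer d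
def pvStepB (d : Int) (routerD : PySem.Dict String (List (Bool × Bool)))
    (fg : PySem.Dict String Int × PySem.Dict String Int) (p : String × Int) :
    PySem.Dict String Int × PySem.Dict String Int :=
  match PySem.List.pyGet? (routerD.getD p.1 []) d with
  | some r =>
    (if r.1 then fg.1.insert p.1 p.2 else fg.1,
     if r.2 then fg.2.insert p.1 p.2 else fg.2)
  | none => fg

def route_args_alt (router : List (String × List (Bool × Bool))) (args : List (String × Int)) (depth : Int) : List ((List (String × Int)) × (List (String × Int))) :=
  let routerD : PySem.Dict String (List (Bool × Bool)) := PySem.Dict.ofList router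
  let argsD : PySem.Dict String Int := PySem.Dict.ofList args
  let matched := argsD.items.filter (fun p => routerD.contains p.1)
  (PySem.List.pyRange 0 depth 1).map (fun d =>
    let fg := matched.foldl (pvStepB d routerD) (PySem.Dict.empty, PySem.Dict.empty)
    (fg.1.items, fg.2.items))

-- ===== PRECONDITION & SPEC =====
def Spec_route_args (router : List (String × List (Bool × Bool))) (args : List (String × Int)) (depth : Int) (out : List ((List (String × Int)) × (List (String × Int)))) : Prop := out = route_args_alt router args depth
instance (router : List (String × List (Bool × Bool))) (args : List (String × Int)) (depth : Int) (out : List ((List (String × Int)) × (List (String × Int)))) : Decidable (Spec_route_args router args depth out) := by unfold Spec_route_args; infer_instance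

-- ===== CLAIM (what is proved, stated in full; the proofs are below) =====
def Claim_equal_route_args : Prop := ∀ (router : List (String × List (Bool × Bool))) (args : List (String × Int)) (depth : Int), Dom_route_args router args depth → Spec_route_args router args depth (route_args router args depth)

-- ===== LEMMAS AND PROOFS =====

theorem pvInnerA_length (key : String) (val : Int)
    (routed : List (PySem.Dict String Int × PySem.Dict String Int)) (rs : List (Bool × Bool)) :
    (pvInnerA key val routed rs).length = routed.length := by
  induction routed generalizing rs with
  | nil => cases rs <;> simp [pvInnerA]
  | cons fg rest ih => cases rs <;> simp [pvInnerA, ih]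

theorem pvInnerA_getElem (key : String) (val : Int)
    (routed : List (PySem.Dict String Int × PySem.Dict String Int)) (rs : List (Bool × Bool))
    (i : Nat) (h : i < (pvInnerA key val routed rs).length) (h' : i < routed.length) :
    (pvInnerA key val routed rs)[i] =
      match rs[i]? with
      | some r => pvMergeA key val routed[i] r
      | none => routed[i] := by
  induction routed generalizing rs i with
  | nil => simp at h'
  | cons fg rest ih =>
    cases rs with
    | nil => simp [pvInnerA]
    | cons r rs' =>
      cases i with
      | zero => simp [pvInnerA]
      | succ n =>
        simp only [pvInnerA, List.getElem_cons_succ, List.getElem?_cons_succ]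
        exact ih rs' n (by simpa [pvInnerA_length] using Nat.lt_of_succ_lt_succ h)
          (Nat.lt_of_succ_lt_succ h')

theorem pvFoldA_length (vf : String → Int) (rf : String → List (Bool × Bool))
    (keys : List String) (routed : List (PySem.Dict String Int × PySem.Dict String Int)) :
    (keys.foldl (fun routed key => pvInnerA key (vf key) routed (rf key)) routed).length
      = routed.length := by
  induction keys generalizing routed with
  | nil => rfl
  | cons k ks ih => simp [List.foldl_cons, ih, pvInnerA_length]

theorem pvFoldA_getElem (vf : String → Int) (rf : String → List (Bool × Bool))
    (keys : List String) (routed : List (PySem.Dict String Int × PySem.Dict String Int))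
    (i : Nat) (h : i < routed.length) :
    (keys.foldl (fun routed key => pvInnerA key (vf key) routed (rf key)) routed)[i]'(by
        rw [pvFoldA_length]; exact h) =
      keys.foldl (fun fg key =>
        match (rf key)[i]? with
        | some r => pvMergeA key (vf key) fg r
        | none => fg) routed[i] := by
  induction keys generalizing routed with
  | nil => rfl
  | cons k ks ih =>
    simp only [List.foldl_cons]
    have h1 : i < (pvInnerA k (vf k) routed (rf k)).length := by
      rw [pvInnerA_length]; exact h
    have := ih (pvInnerA k (vf k) routed (rf k)) h1
    rw [this, pvInnerA_getElem _ _ _ _ _ h1 h]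

-- the per-layer steps of the two programs agree on pairs whose value matches the dict
theorem pvStep_bridge (argsD : PySem.Dict String Int)
    (routerD : PySem.Dict String (List (Bool × Bool))) (i : Nat)
    (l : List (String × Int)) (hl : ∀ p ∈ l, argsD.getD p.1 0 = p.2)
    (e : PySem.Dict String Int × PySem.Dict String Int) :
    (l.map Prod.fst).foldl (fun fg key =>
        match (routerD.getD key [])[i]? with
        | some r => pvMergeA key (argsD.getD key 0) fg r
        | none => fg) e
      = l.foldl (pvStepB (i : Int) routerD) e := by
  induction l generalizing e with
  | nil => rfl
  | cons p l' ih =>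
    simp only [List.map_cons, List.foldl_cons]
    rw [ih (fun q hq => hl q (List.mem_cons_of_mem _ hq)) _]
    congr 1
    have hv : argsD.getD p.1 0 = p.2 := hl p (List.mem_cons_self ..)
    simp only [pvStepB, PySem.List.pyGet?_natCast, hv]
    cases hr : (routerD.getD p.1 [])[i]? with
    | none => rfl
    | some r =>
      cases r with
      | mk a b =>
        cases a <;> cases b <;>
          simp [pvMergeA, PySem.Dict.update]

theorem route_args_eq (router : List (String × List (Bool × Bool)))
    (args : List (String × Int)) (depth : Int) :
    route_args router args depth = route_args_alt router args depth := by
  unfold route_args route_args_alt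
  simp only []
  apply List.ext_getElem
  · simp [pvFoldA_length]
  · intro i h1 h2
    set routerD := PySem.Dict.ofList router with hR
    set argsD := PySem.Dict.ofList args with hA
    have hlen : i < ((PySem.List.pyRange 0 depth 1).map
        (fun _ => ((PySem.Dict.empty : PySem.Dict String Int),
                   (PySem.Dict.empty : PySem.Dict String Int)))).length := by
      simpa [pvFoldA_length] using h1
    have hir : i < (PySem.List.pyRange 0 depth 1).length := by simpa using hlen
    rw [List.getElem_map, List.getElem_map]
    rw [pvFoldA_getElem (fun key => argsD.getD key 0) (fun key => routerD.getD key []) _ _ i hlen]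
    rw [List.getElem_map]
    have hkeys : argsD.keys.filter (fun k => routerD.contains k)
        = (argsD.items.filter (fun p => routerD.contains p.1)).map Prod.fst := by
      show (argsD.items.map Prod.fst).filter (fun k => routerD.contains k) = _
      rw [List.filter_map]
      rfl
    rw [hkeys]
    rw [pvStep_bridge argsD routerD i _ (fun p hp => by
      have hp' : p ∈ argsD.items := (List.mem_filter.mp hp).1
      exact PySem.Dict.getD_of_mem_items argsD (by simpa using hp')
        (PySem.Dict.nodup_keys_ofList args) 0)]
    have hval : (PySem.List.pyRange 0 depth 1)[i] = (i : Int) := by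
      rw [PySem.List.getElem_pyRange_one]; simp
    rw [hval]
-- ===== VERDICT (by name: the statement is the Claim_ definition above) =====
theorem route_args_spec : Claim_equal_route_args := by
  intro router args depth _
  unfold Spec_route_args
  exact route_args_eq router args depth
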